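-- pv_equiv track=rewrite | github.com/blakebonasera/Algos | generateDocument.py | generateDocument2
-- ===== SOURCE A (Python) =====
-- def countCharacterFrequency(character, target):
--     frequency = 0
--     for char in target:
--         if char == character:
--             frequency += 1
--
--     return frequency
--
-- def generateDocument2(characters, document):
--     alreadyCounted = set()
--
--     for character in document:
--         if character in alreadyCounted:
--             continue
--
--         documentFrequency = countCharacterFrequency(character, document)
--         charactersFrequency = countCharacterFrequency(character, characters)
--         if documentFrequency > charactersFrequency:
--             return False
--
--         alreadyCounted.add(character)
--
--     return True
-- ===== SOURCE B (Python) =====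
-- def generateDocument2(characters, document):
--     budget = {}
--     for char in characters:
--         budget[char] = budget.get(char, 0) + 1
--     for char in document:
--         remaining = budget.get(char, 0) - 1
--         if remaining < 0:
--             return False
--         budget[char] = remaining
--     return True
-- ===== Notes on version B (the rewrite author's own statement) =====
-- stated objective: alternative
-- what changed: Instead of grouping unique document characters and re-scanning both whole strings to compare per-character totals, B builds one frequency dict of characters and makes a single early-exit pass over document, decrementing a running budget and returning False as soon as any character's budget goes negative.
import Mathlib
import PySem

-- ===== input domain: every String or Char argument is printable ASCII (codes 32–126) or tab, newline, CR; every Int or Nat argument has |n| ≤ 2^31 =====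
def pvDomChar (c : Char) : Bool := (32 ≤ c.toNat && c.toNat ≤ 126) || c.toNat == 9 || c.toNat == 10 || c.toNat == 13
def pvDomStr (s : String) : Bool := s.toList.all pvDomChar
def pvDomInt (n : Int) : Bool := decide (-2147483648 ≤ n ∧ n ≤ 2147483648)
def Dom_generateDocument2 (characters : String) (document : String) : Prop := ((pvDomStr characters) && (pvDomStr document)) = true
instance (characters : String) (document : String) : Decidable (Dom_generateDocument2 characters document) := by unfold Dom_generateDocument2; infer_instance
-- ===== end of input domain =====

-- B replaces A's per-unique-character rescans of both strings by one frequency dict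
-- of `characters` consumed in a single early-exit pass over `document` (alternative algorithm).

-- ===== PORT A =====
def countCharacterFrequency (character : Char) (target : List Char) : Int :=
  target.foldl (fun frequency char => if char = character then frequency + 1 else frequency) 0

def generateDocument2Go (characters document : List Char) :
    List Char → PySem.Set Char → Bool
  | [], _ => true
  | character :: rest, alreadyCounted =>
    if character ∈ alreadyCounted then
      generateDocument2Go characters document rest alreadyCounted
    else if countCharacterFrequency character document >
            countCharacterFrequency character characters then false
    else generateDocument2Go characters document rest (alreadyCounted.add character)

def generateDocument2 (characters : String) (document : String) : Bool :=
  generateDocument2Go characters.toList document.toList document.toList PySem.Set.empty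

-- ===== PORT B =====
def generateDocument2AltGo : List Char → PySem.Dict Char Int → Bool
  | [], _ => true
  | char :: rest, budget =>
    if budget.getD char 0 - 1 < 0 then false
    else generateDocument2AltGo rest (budget.insert char (budget.getD char 0 - 1))

def generateDocument2_alt (characters : String) (document : String) : Bool :=
  let budget := characters.toList.foldl
    (fun d char => d.insert char (d.getD char 0 + 1)) PySem.Dict.empty
  generateDocument2AltGo document.toList budget

-- ===== PRECONDITION & SPEC =====
def Spec_generateDocument2 (characters : String) (document : String) (out : Bool) : Prop := out = generateDocument2_alt characters document
instance (characters : String) (document : String) (out : Bool) : Decidable (Spec_generateDocument2 characters document out) := by unfold Spec_generateDocument2; infer_instance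

-- ===== CLAIM (what is proved, stated in full; the proofs are below) =====
def Claim_equal_generateDocument2 : Prop := ∀ (characters : String) (document : String), Dom_generateDocument2 characters document → Spec_generateDocument2 characters document (generateDocument2 characters document)

-- ===== LEMMAS AND PROOFS =====

theorem countCharacterFrequency_eq_count (character : Char) (target : List Char) :
    countCharacterFrequency character target = (target.count character : Int) := by
  unfold countCharacterFrequency
  have := PySem.List.foldl_count_if (fun char => decide (char = character)) target 0
  simpa [List.count] using this

-- A's loop returns true iff every not-yet-counted character of `rest` fits,
-- assuming every counted character already fits.
theorem goA_eq_true_iff (characters document : List Char) (rest : List Char)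
    (counted : PySem.Set Char)
    (hc : ∀ c ∈ counted, document.count c ≤ characters.count c) :
    generateDocument2Go characters document rest counted = true ↔
      ∀ c ∈ rest, document.count c ≤ characters.count c := by
  induction rest generalizing counted with
  | nil =>
    constructor
    · intro _ c hc; cases hc
    · intro _; rfl
  | cons x rest ih =>
    unfold generateDocument2Go
    by_cases hx : x ∈ counted
    · rw [if_pos hx, ih counted hc]
      constructor
      · intro h c hc'
        rcases List.mem_cons.mp hc' with rfl | h'
        · exact hc _ hx
        · exact h _ h'
      · intro h c hc'; exact h _ (List.mem_cons_of_mem _ hc')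
    · rw [if_neg hx, countCharacterFrequency_eq_count, countCharacterFrequency_eq_count]
      by_cases hgt : document.count x > characters.count x
      · rw [if_pos (by exact_mod_cast hgt)]
        simp only [Bool.false_eq_true, false_iff, not_forall]
        exact ⟨x, List.mem_cons_self, by omega⟩
      · rw [if_neg (by exact_mod_cast hgt)]
        rw [ih (counted.add x) ?_]
        · constructor
          · intro h c hc'
            rcases List.mem_cons.mp hc' with rfl | h'
            · omega
            · exact h _ h'
          · intro h c hc'; exact h _ (List.mem_cons_of_mem _ hc')
        · intro c hmem
          rcases (PySem.Set.mem_add counted x c).mp hmem with h' | rfl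
          · exact hc _ h'
          · omega

-- B's loop returns true iff every character of `rest` occurs in `rest`
-- no more often than its remaining budget.
theorem goB_eq_true_iff (rest : List Char) (budget : PySem.Dict Char Int) :
    generateDocument2AltGo rest budget = true ↔
      ∀ c ∈ rest, (rest.count c : Int) ≤ budget.getD c 0 := by
  induction rest generalizing budget with
  | nil =>
    constructor
    · intro _ c hc; cases hc
    · intro _; rfl
  | cons x rest ih =>
    unfold generateDocument2AltGo
    by_cases hneg : budget.getD x 0 - 1 < 0
    · rw [if_pos hneg]
      simp only [Bool.false_eq_true, false_iff, not_forall]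
      refine ⟨x, List.mem_cons_self, ?_⟩
      rw [List.count_cons_self]; push_cast; omega
    · rw [if_neg hneg, ih]
      constructor
      · intro h c hc'
        rcases List.mem_cons.mp hc' with rfl | h'
        · by_cases hcr : c ∈ rest
          · have := h c hcr
            rw [PySem.Dict.getD_insert] at this
            rw [if_pos rfl] at this
            rw [List.count_cons_self]; push_cast; omega
          · rw [List.count_cons_self, List.count_eq_zero_of_not_mem hcr]
            push_cast; omega
        · have := h c h'
          rw [PySem.Dict.getD_insert] at this
          by_cases hcx : c = x
          · subst hcx
            rw [if_pos rfl] at this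
            rw [List.count_cons_self]; push_cast; omega
          · rw [if_neg hcx] at this
            rw [List.count_cons_of_ne (fun hxc => hcx hxc.symm)]; exact this
      · intro h c hc'
        have := h c (List.mem_cons_of_mem _ hc')
        rw [PySem.Dict.getD_insert]
        by_cases hcx : c = x
        · subst hcx
          rw [List.count_cons_self] at this
          rw [if_pos rfl]; push_cast at this ⊢; omega
        · rw [List.count_cons_of_ne (fun hxc => hcx hxc.symm)] at this
          rw [if_neg hcx]; exact this

-- ===== VERDICT (by name: the statement is the Claim_ definition above) =====
theorem generateDocument2_spec : Claim_equal_generateDocument2 := by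
  intro characters document _
  unfold Spec_generateDocument2 generateDocument2 generateDocument2_alt
  rw [PySem.Dict.foldl_insert_getD_add_one_eq_counter]
  have hA := goA_eq_true_iff characters.toList document.toList document.toList
    PySem.Set.empty (by intro c hc; cases hc)
  have hB := goB_eq_true_iff document.toList (PySem.Dict.counter characters.toList)
  have hiff : (generateDocument2Go characters.toList document.toList document.toList
      PySem.Set.empty = true) ↔
      (generateDocument2AltGo document.toList (PySem.Dict.counter characters.toList) = true) := by
    rw [hA, hB]
    constructor
    · intro h c hc
      rw [PySem.Dict.getD_counter]
      exact_mod_cast h c hc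
    · intro h c hc
      have := h c hc
      rw [PySem.Dict.getD_counter] at this
      exact_mod_cast this
  rcases hb : generateDocument2AltGo document.toList (PySem.Dict.counter characters.toList) with _ | _
  · rcases ha : generateDocument2Go characters.toList document.toList document.toList PySem.Set.empty with _ | _
    · rfl
    · exact absurd (hiff.mp ha) (by simp [hb])
  · exact hiff.mpr hb
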